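-- pv_equiv track=rewrite | github.com/imtambovtcev/chem_utils | chem_utils/check_and_copy_path.py | holes
-- ===== SOURCE A (Python) =====
-- def holes(l):
--     holes_list = []
--     in_hole = False
--     for i, value in enumerate(l):
--         if value:
--             in_hole = False
--         else:
--             if in_hole:
--                 holes_list[-1][1] += 1
--             else:
--                 in_hole = True
--                 holes_list.append([i, 1])
--
--     return holes_list
-- ===== SOURCE B (Python) =====
-- def holes(l):
--     t = [bool(v) for v in l]
--     prev = [True] + t[:-1]
--     nxt = t[1:] + [True]
--     starts = [i for i, (v, p) in enumerate(zip(t, prev)) if not v and p]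
--     ends = [i for i, (v, q) in enumerate(zip(t, nxt)) if not v and q]
--     return [[s, e - s + 1] for s, e in zip(starts, ends)]
-- ===== Notes on version B (the rewrite author's own statement) =====
-- stated objective: alternative
-- what changed: Replaces the stateful single-pass run tracker that mutates its last appended entry with a staged boundary-detection pipeline: build shifted neighbour arrays, select run-start indices (falsy with truthy/absent left neighbour) and run-end indices (falsy with truthy/absent right neighbour) in two independent passes, then zip starts with ends into [start, length] pairs.
import Mathlib
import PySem

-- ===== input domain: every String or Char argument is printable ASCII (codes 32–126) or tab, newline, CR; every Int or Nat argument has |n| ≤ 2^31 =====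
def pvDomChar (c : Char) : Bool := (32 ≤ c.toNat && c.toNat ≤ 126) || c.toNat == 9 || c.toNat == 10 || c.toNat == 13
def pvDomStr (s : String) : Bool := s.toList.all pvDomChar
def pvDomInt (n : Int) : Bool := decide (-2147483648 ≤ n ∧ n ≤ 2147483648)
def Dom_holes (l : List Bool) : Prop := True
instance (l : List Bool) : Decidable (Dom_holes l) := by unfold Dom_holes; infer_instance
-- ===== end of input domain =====

-- B replaces A's stateful run tracker (which mutates its last appended entry) with a staged
-- boundary-detection pipeline: shifted neighbour lists, two independent passes selecting
-- run-start and run-end indices, and a final zip into [start, length] pairs.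
-- ===== PORT A =====
-- holes_list[-1][1] += 1
def pvBumpSnd (x : List Int) : List Int :=
  match x with
  | a :: b :: rest => a :: (b + 1) :: rest
  | x => x
def pvBumpLast (hl : List (List Int)) : List (List Int) :=
  match hl with
  | [] => []
  | [x] => [pvBumpSnd x]
  | x :: xs => x :: pvBumpLast xs
-- the for loop over enumerate(l) with state (holes_list, in_hole)
def holesGo (l : List Bool) (i : Int) (hl : List (List Int)) (inh : Bool) : List (List Int) :=
  match l with
  | [] => hl
  | v :: rest =>
    if v then holesGo rest (i + 1) hl false
    else if inh then holesGo rest (i + 1) (pvBumpLast hl) true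
    else holesGo rest (i + 1) (hl ++ [[i, 1]]) true

def holes (l : List Bool) : List (List Int) := holesGo l 0 [] false

-- ===== PORT B =====
-- the two index comprehensions: walk the zipped pairs with a running index,
-- keeping the index when the element is falsy and its neighbour flag is set
def pvSelect (f : Bool → Bool → Bool) (ps : List (Bool × Bool)) (i : Int) : List Int :=
  match ps with
  | [] => []
  | (v, w) :: rest => (if f v w then [i] else []) ++ pvSelect f rest (i + 1)

def holes_alt (l : List Bool) : List (List Int) :=
  let t := l.map (fun v => v)                                  -- [bool(v) for v in l]
  let prev := true :: PySem.List.slice t none (some (-1))      -- [True] + t[:-1]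
  let nxt := PySem.List.slice t (some 1) none ++ [true]        -- t[1:] + [True]
  let starts := pvSelect (fun v p => !v && p) (t.zip prev) 0
  let ends := pvSelect (fun v q => !v && q) (t.zip nxt) 0
  (starts.zip ends).map (fun se => [se.1, se.2 - se.1 + 1])

-- ===== PRECONDITION & SPEC =====
def Spec_holes (l : List Bool) (out : List (List Int)) : Prop := out = holes_alt l
instance (l : List Bool) (out : List (List Int)) : Decidable (Spec_holes l out) := by unfold Spec_holes; infer_instance

-- ===== CLAIM (what is proved, stated in full; the proofs are below) =====
def Claim_equal_holes : Prop := ∀ (l : List Bool), Dom_holes l → Spec_holes l (holes l)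

-- ===== LEMMAS AND PROOFS =====

-- proof-side canonical form: peel one maximal run per step, emit falsy runs
def runsGo (l : List Bool) (start : Int) : List (List Int) :=
  match l with
  | [] => []
  | b :: rest =>
    let n : Int := 1 + (rest.takeWhile (· == b)).length
    let rest' := rest.dropWhile (· == b)
    if b then runsGo rest' (start + n)
    else [start, n] :: runsGo rest' (start + n)
termination_by l.length
decreasing_by all_goals { simp only [List.length_cons]; exact Nat.lt_succ_of_le (List.length_dropWhile_le _ _) }

lemma bumpLast_append (hl : List (List Int)) (p q : Int) :
    pvBumpLast (hl ++ [[p, q]]) = hl ++ [[p, q + 1]] := by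
  induction hl with
  | nil => rfl
  | cons x xs ih =>
    cases xs with
    | nil => simp [pvBumpLast, pvBumpSnd] at ih ⊢
    | cons y ys => simpa [pvBumpLast] using ih

lemma runsGo_true (rest : List Bool) (i : Int) :
    runsGo (true :: rest) i = runsGo rest (i + 1) := by
  cases rest with
  | nil => rw [runsGo.eq_def]; simp
  | cons b r =>
    cases b with
    | false =>
      rw [runsGo.eq_def]
      simp [List.takeWhile, List.dropWhile]
    | true =>
      conv_rhs => rw [runsGo.eq_def]
      rw [runsGo.eq_def]
      simp [List.takeWhile, List.dropWhile, add_assoc]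
      congr 1
      ring

lemma holes_combined (n : Nat) : ∀ (l : List Bool), l.length ≤ n →
    (∀ (i : Int) (hl : List (List Int)), holesGo l i hl false = hl ++ runsGo l i) ∧
    (∀ (i : Int) (hl : List (List Int)) (p q : Int),
      holesGo l i (hl ++ [[p, q]]) true =
        hl ++ [[p, q + ((l.takeWhile (· == false)).length : Int)]]
           ++ runsGo (l.dropWhile (· == false)) (i + (l.takeWhile (· == false)).length)) := by
  induction n with
  | zero =>
    intro l hlen
    have : l = [] := List.eq_nil_of_length_eq_zero (Nat.le_zero.mp hlen)
    subst this
    constructor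
    · intro i hl; rw [runsGo.eq_def]; simp [holesGo]
    · intro i hl p q; rw [runsGo.eq_def]; simp [holesGo]
  | succ m ih =>
    intro l hlen
    cases l with
    | nil =>
      constructor
      · intro i hl; rw [runsGo.eq_def]; simp [holesGo]
      · intro i hl p q; rw [runsGo.eq_def]; simp [holesGo]
    | cons v rest =>
      have hrest : rest.length ≤ m := Nat.lt_succ_iff.mp (by simpa using hlen)
      constructor
      · intro i hl
        cases v with
        | true =>
          rw [holesGo, runsGo_true]
          simpa using (ih rest hrest).1 (i + 1) hl
        | false =>
          rw [holesGo]
          simp only [if_false, Bool.false_eq_true]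
          have h2 := (ih rest hrest).2 (i + 1) hl i 1
          rw [h2]
          conv_rhs => rw [runsGo.eq_def]
          simp [List.append_assoc, add_assoc]
      · intro i hl p q
        cases v with
        | true =>
          rw [holesGo]
          simp only [if_true]
          have h1 := (ih rest hrest).1 (i + 1) (hl ++ [[p, q]])
          rw [h1, ← runsGo_true rest i]
          simp [List.takeWhile, List.dropWhile, List.append_assoc]
        | false =>
          rw [holesGo]
          simp only [Bool.false_eq_true, if_false, if_true]
          rw [bumpLast_append]
          have h2 := (ih rest hrest).2 (i + 1) hl p (q + 1)
          rw [h2]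
          simp [List.takeWhile, List.dropWhile, List.append_assoc, add_assoc]
          refine ⟨by ring, ?_⟩
          congr 1
          ring

-- B-side: recursive characterisations of the two selection passes
def sRec (p : Bool) (l : List Bool) (i : Int) : List Int :=
  match l with
  | [] => []
  | v :: r => (if !v && p then [i] else []) ++ sRec v r (i + 1)

def eRec (l : List Bool) (i : Int) : List Int :=
  match l with
  | [] => []
  | v :: r => (if !v && r.headD true then [i] else []) ++ eRec r (i + 1)

lemma select_prev (l : List Bool) : ∀ (p : Bool) (i : Int),
    pvSelect (fun v w => !v && w) (l.zip (p :: l.dropLast)) i = sRec p l i := by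
  induction l with
  | nil => intro p i; rfl
  | cons v r ih =>
    intro p i
    cases r with
    | nil => simp [pvSelect, sRec]
    | cons w r' =>
      rw [List.dropLast_cons_of_ne_nil (by simp), List.zip_cons_cons, sRec, pvSelect,
        ih v (i + 1)]

lemma select_nxt (l : List Bool) : ∀ (i : Int),
    pvSelect (fun v w => !v && w) (l.zip (l.tail ++ [true])) i = eRec l i := by
  induction l with
  | nil => intro i; rfl
  | cons v r ih =>
    intro i
    cases r with
    | nil => simp [pvSelect, eRec]
    | cons w r' =>
      have h := ih (i + 1)
      simp only [List.tail_cons] at h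
      rw [List.tail_cons, List.cons_append, List.zip_cons_cons, eRec, pvSelect, h]
      simp

-- the main invariant: zipping starts with ends yields the run decomposition
lemma zip_runs (n : Nat) : ∀ (l : List Bool), l.length ≤ n →
    (∀ (r : List Bool) (i s : Int), l = false :: r →
      ((s :: sRec false l i).zip (eRec l i)).map (fun se => [se.1, se.2 - se.1 + 1]) =
        [s, i - s + ((l.takeWhile (· == false)).length : Int)] ::
          runsGo (l.dropWhile (· == false)) (i + (l.takeWhile (· == false)).length)) ∧
    (∀ (i : Int),
      ((sRec true l i).zip (eRec l i)).map (fun se => [se.1, se.2 - se.1 + 1]) = runsGo l i) := by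
  induction n with
  | zero =>
    intro l hlen
    have : l = [] := List.eq_nil_of_length_eq_zero (Nat.le_zero.mp hlen)
    subst this
    refine ⟨?_, ?_⟩
    · intro r i s h; simp at h
    · intro i; rw [runsGo.eq_def]; simp [sRec, eRec]
  | succ m ih =>
    intro l hlen
    have h2 : ∀ (r : List Bool) (i s : Int), l = false :: r →
        ((s :: sRec false l i).zip (eRec l i)).map (fun se => [se.1, se.2 - se.1 + 1]) =
          [s, i - s + ((l.takeWhile (· == false)).length : Int)] ::
            runsGo (l.dropWhile (· == false)) (i + (l.takeWhile (· == false)).length) := by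
      intro r i s hform
      subst hform
      have hr : r.length ≤ m := Nat.lt_succ_iff.mp (by simpa using hlen)
      cases r with
      | nil =>
        rw [runsGo.eq_def]
        simp [sRec, eRec, List.takeWhile, List.dropWhile]
      | cons w r' =>
        have hr' : r'.length ≤ m := le_trans (by simp) hr
        cases w with
        | true =>
          have h1 := (ih r' hr').2 (i + 1 + 1)
          simp [sRec, eRec, List.takeWhile, List.dropWhile] at h1 ⊢
          rw [runsGo_true]
          exact h1
        | false =>
          have h1 := (ih (false :: r') (by simpa using hr)).1 r' (i + 1) s rfl
          simp [sRec, eRec, List.takeWhile, List.dropWhile] at h1 ⊢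
          rw [h1]
          congr 2 <;> ring_nf
    refine ⟨h2, ?_⟩
    intro i
    cases l with
    | nil => rw [runsGo.eq_def]; simp [sRec, eRec]
    | cons v rest =>
      have hr : rest.length ≤ m := Nat.lt_succ_iff.mp (by simpa using hlen)
      cases v with
      | true =>
        rw [runsGo_true]
        have h1 := (ih rest hr).2 (i + 1)
        simp [sRec, eRec] at h1 ⊢
        exact h1
      | false =>
        have h1 := h2 rest i i rfl
        simp [sRec, eRec] at h1 ⊢
        rw [h1]
        conv_rhs => rw [runsGo.eq_def]
        simp
        constructor <;> ring_nf

-- ===== VERDICT (by name: the statement is the Claim_ definition above) =====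
theorem holes_spec : Claim_equal_holes := by
  intro l _
  unfold Spec_holes holes holes_alt
  have hA : holesGo l 0 [] false = runsGo l 0 := by
    simpa using (holes_combined l.length l le_rfl).1 0 []
  rw [hA]
  simp only [PySem.List.slice_to_neg_one, PySem.List.slice_from_one, List.map_id']
  rw [select_prev l true 0, select_nxt l 0]
  exact ((zip_runs l.length l le_rfl).2 0).symm
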